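-- pv_equiv track=rewrite | github.com/adit-prim/project_iseng | gabungan avk.py | vigenere_decrypt_preserve
-- ===== SOURCE A (Python) =====
-- def vigenere_decrypt_preserve(text, key):
--     key = key.upper()
--     result = ''
--     key_index = 0
--
--     for char in text:
--         if char.isalpha():
--             offset = ord('A') if char.isupper() else ord('a')
--             k = ord(key[key_index % len(key)]) - ord('A')
--             p = chr((ord(char) - offset - k) % 26 + offset)
--             result += p
--             key_index += 1
--         else:
--             result += char
--     return result
-- ===== SOURCE B (Python) =====
-- def vigenere_decrypt_preserve(text, key):
--     # Classic tableau approach: precompute one monoalphabetic substitution table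
--     # per key position (a rotated alphabet), then decrypt the stripped letter
--     # stream by table lookup and re-interleave it with the non-letters.
--     U = 'ABCDEFGHIJKLMNOPQRSTUVWXYZ'
--     L = U.lower()
--     tables = []
--     for kc in key.upper():
--         m = (ord('A') - ord(kc)) % 26
--         tables.append(dict(zip(U + L, U[m:] + U[:m] + L[m:] + L[:m])))
--     letters = [c for c in text if c.isalpha()]
--     dec = [tables[n % len(tables)][c] for n, c in enumerate(letters)]
--     it = iter(dec)
--     return ''.join(next(it) if c.isalpha() else c for c in text)
-- ===== Notes on version B (the rewrite author's own statement) =====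
-- stated objective: alternative
-- what changed: A's single interleaved loop doing modular ord-arithmetic per character is replaced by the classic tableau method: one precomputed rotated-alphabet substitution dictionary per key position, the letters of the text stripped out and decrypted purely by dictionary lookup, then re-interleaved with the untouched non-letters.
import Mathlib
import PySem

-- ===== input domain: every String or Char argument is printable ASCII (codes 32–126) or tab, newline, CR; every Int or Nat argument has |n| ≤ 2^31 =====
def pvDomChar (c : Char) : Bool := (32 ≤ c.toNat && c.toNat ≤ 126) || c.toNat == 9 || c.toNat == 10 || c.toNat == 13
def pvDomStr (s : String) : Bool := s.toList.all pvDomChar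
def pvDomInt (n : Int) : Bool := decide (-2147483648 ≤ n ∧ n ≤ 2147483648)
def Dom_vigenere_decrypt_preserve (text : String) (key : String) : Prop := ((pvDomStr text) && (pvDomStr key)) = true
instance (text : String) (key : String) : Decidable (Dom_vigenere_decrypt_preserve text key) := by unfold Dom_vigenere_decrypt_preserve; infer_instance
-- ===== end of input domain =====

-- B replaces A's per-character modular arithmetic by the classic tableau method:
-- one rotated-alphabet substitution dict per key position, the stripped letter
-- stream decrypted by dict lookup, then re-interleaved with the non-letters.


-- ===== PORT A =====
-- the loop body of A: state = (result so far, key_index)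
def pvStepA (ku : List Char) (st : List Char × Nat) (char : Char) : List Char × Nat :=
  if PySem.Chars.isalpha char then
    let offset : Int := if PySem.Chars.isupper char then 65 else 97
    let k : Int := ((ku.getD (st.2 % ku.length) 'A').toNat : Int) - 65
    let p : Char := Char.ofNat (PySem.Int.mod ((char.toNat : Int) - offset - k) 26 + offset).toNat
    (st.1 ++ [p], st.2 + 1)
  else (st.1 ++ [char], st.2)

def vigenere_decrypt_preserve (text : String) (key : String) : String :=
  let ku := (PySem.Str.upper key).toList
  String.mk ((text.toList.foldl (pvStepA ku) ([], 0)).1)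

-- ===== PORT B =====
-- U = 'ABC…Z', L = U.lower()
def pvU : List Char := "ABCDEFGHIJKLMNOPQRSTUVWXYZ".toList
def pvL : List Char := PySem.Chars.lower pvU

-- body of B's table loop: dict(zip(U + L, U[m:] + U[:m] + L[m:] + L[:m]))
def pvTableB (kc : Char) : PySem.Dict Char Char :=
  let m : Int := PySem.Int.mod (65 - (kc.toNat : Int)) 26
  PySem.Dict.ofList ((pvU ++ pvL).zip
    (PySem.List.slice pvU (some m) none ++ PySem.List.slice pvU none (some m) ++
     PySem.List.slice pvL (some m) none ++ PySem.List.slice pvL none (some m)))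

-- ''.join(next(it) if c.isalpha() else c for c in text): consume dec on letters
def pvMergeB : List Char → List Char → List Char
  | [], _ => []
  | c :: t, dec =>
    if PySem.Chars.isalpha c then dec.headD 'A' :: pvMergeB t dec.tail
    else c :: pvMergeB t dec

def vigenere_decrypt_preserve_alt (text : String) (key : String) : String :=
  let tables := (PySem.Str.upper key).toList.foldl (fun acc kc => acc ++ [pvTableB kc]) []
  let letters := text.toList.filter (fun c => PySem.Chars.isalpha c)
  -- tables[n % len(tables)][c]: the key c is always present (c is a letter), so the
  -- KeyError-free lookup is ported as getD
  let dec := (PySem.List.enumerate letters).map (fun nc =>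
    (PySem.List.pyGetD tables (PySem.Int.mod nc.1 (tables.length : Int)) (PySem.Dict.mk [])).getD nc.2 'A')
  String.mk (pvMergeB text.toList dec)

-- ===== PRECONDITION & SPEC =====
-- Pre_ excludes exactly the inputs where Python A raises ZeroDivisionError:
-- an empty key together with at least one alphabetic character in the text.
def Pre_vigenere_decrypt_preserve (text : String) (key : String) : Prop :=
  key.toList ≠ [] ∨ text.toList.all (fun c => !PySem.Chars.isalpha c) = true
instance (text : String) (key : String) : Decidable (Pre_vigenere_decrypt_preserve text key) := by unfold Pre_vigenere_decrypt_preserve; infer_instance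
def pvWitness_vigenere_decrypt_preserve : String × String := ("Ab c.", "Key")

def Spec_vigenere_decrypt_preserve (text : String) (key : String) (out : String) : Prop := out = vigenere_decrypt_preserve_alt text key
instance (text : String) (key : String) (out : String) : Decidable (Spec_vigenere_decrypt_preserve text key out) := by unfold Spec_vigenere_decrypt_preserve; infer_instance

-- ===== CLAIM (what is proved, stated in full; the proofs are below) =====
def Claim_equal_vigenere_decrypt_preserve : Prop := ∀ (text : String) (key : String), Dom_vigenere_decrypt_preserve text key → Pre_vigenere_decrypt_preserve text key → Spec_vigenere_decrypt_preserve text key (vigenere_decrypt_preserve text key)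

-- ===== LEMMAS AND PROOFS =====

-- the decrypted character for char c under key counter n (A's arithmetic)
def pvDec (ku : List Char) (c : Char) (n : Int) : Char :=
  let off : Int := if PySem.Chars.isupper c then 65 else 97
  Char.ofNat (PySem.Int.mod ((c.toNat : Int) - off - (((PySem.List.pyGetD ku (PySem.Int.mod n (ku.length : Int)) 'A').toNat : Int) - 65)) 26 + off).toNat

-- reference: map with a running key counter
def pvMapA (ku : List Char) : List Char → Int → List Char
  | [], _ => []
  | c :: t, n => if PySem.Chars.isalpha c then pvDec ku c n :: pvMapA ku t (n + 1) else c :: pvMapA ku t n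

theorem pvA_foldl (ku : List Char) (cs : List Char) (acc : List Char) (j : Nat) :
    (cs.foldl (pvStepA ku) (acc, j)).1 = acc ++ pvMapA ku cs (j : Int) := by
  induction cs generalizing acc j with
  | nil => simp [pvMapA]
  | cons c t ih =>
    by_cases h : PySem.Chars.isalpha c = true
    · simp only [List.foldl_cons, pvStepA, h, if_pos, pvMapA]
      rw [ih]
      have : pvDec ku c (j : Int) =
          Char.ofNat (PySem.Int.mod ((c.toNat : Int) - (if PySem.Chars.isupper c then (65:Int) else 97) - (((ku.getD (j % ku.length) 'A').toNat : Int) - 65)) 26 + (if PySem.Chars.isupper c then (65:Int) else 97)).toNat := by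
        rw [pvDec]
        rw [PySem.Int.mod_natCast, PySem.List.pyGetD_natCast]
      push_cast
      simp [this]
    · simp only [List.foldl_cons, pvStepA, h, pvMapA, Bool.false_eq_true, if_false]
      rw [ih]
      simp

-- the two alphabets, as range-maps
theorem pvU_eq : pvU = (List.range 26).map (fun i => Char.ofNat (65 + i)) := by decide
theorem pvL_eq : pvL = (List.range 26).map (fun i => Char.ofNat (97 + i)) := by decide

-- rotation of a 26-letter range-map alphabet, looked up at j
theorem pvRot_getElem (f : Nat → Char) (mt j : Nat) (hm : mt < 26) (hj : j < 26) :
    let A := (List.range 26).map f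
    (A.drop mt ++ A.take mt)[j]? = some (f ((j + mt) % 26)) := by
  intro A
  have hlenA : A.length = 26 := by simp [A]
  have hAget : ∀ i, i < 26 → A[i]? = some (f i) := by
    intro i hi
    simp [A, hi]
  by_cases h : j < 26 - mt
  · rw [List.getElem?_append_left (by simp [hlenA]; omega)]
    rw [List.getElem?_drop]
    rw [hAget (mt + j) (by omega)]
    congr 2
    omega
  · rw [List.getElem?_append_right (by simp [hlenA]; omega)]
    have hlen : (A.drop mt).length = 26 - mt := by simp [hlenA]
    rw [hlen]
    have hj' : j - (26 - mt) < (A.take mt).length := by simp [hlenA]; omega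
    rw [List.getElem?_eq_getElem hj']
    rw [List.getElem_take]
    rw [← List.getElem?_eq_getElem (by omega : j - (26 - mt) < A.length)]
    rw [hAget (j - (26 - mt)) (by omega)]
    congr 2
    omega

-- the table of B is a fresh-key dict over the 52 zipped pairs
theorem pvKeysNodup : (pvU ++ pvL).Nodup := by decide

theorem pvZipNodupFst {vs : List Char} (h : (pvU ++ pvL).length ≤ vs.length) :
    (((pvU ++ pvL).zip vs).map (fun p : Char × Char => p.1)).Nodup := by
  rw [show (fun p : Char × Char => p.1) = Prod.fst from rfl]
  rw [List.map_fst_zip h]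
  exact pvKeysNodup

-- a text with no letters passes through both programs unchanged
theorem pvMerge_nil (ku : List Char) :
    ∀ (cs : List Char), cs.all (fun c => !PySem.Chars.isalpha c) = true →
      ∀ n, pvMergeB cs [] = pvMapA ku cs n := by
  intro cs
  induction cs with
  | nil => intro _ n; simp [pvMergeB, pvMapA]
  | cons c t ih =>
    intro hall n
    have hc : PySem.Chars.isalpha c = false := by
      have := List.all_eq_true.mp hall c (by simp)
      simpa using this
    have ht : t.all (fun c => !PySem.Chars.isalpha c) = true := by
      rw [List.all_eq_true] at hall ⊢
      intro x hx; exact hall x (by simp [hx])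
    simp only [pvMergeB, pvMapA, hc, Bool.false_eq_true, if_false]
    rw [ih ht n]

-- the rotation amount of B's table, as a Nat below 26
theorem pvM_bounds (kc : Char) : 0 ≤ PySem.Int.mod (65 - (kc.toNat : Int)) 26 ∧ PySem.Int.mod (65 - (kc.toNat : Int)) 26 < 26 :=
  ⟨PySem.Int.mod_nonneg _ (by norm_num), PySem.Int.mod_lt _ (by norm_num)⟩

theorem pvSlices (xs : List Char) (kc : Char) :
    PySem.List.slice xs (some (PySem.Int.mod (65 - (kc.toNat : Int)) 26)) none = xs.drop (PySem.Int.mod (65 - (kc.toNat : Int)) 26).toNat ∧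
    PySem.List.slice xs none (some (PySem.Int.mod (65 - (kc.toNat : Int)) 26)) = xs.take (PySem.Int.mod (65 - (kc.toNat : Int)) 26).toNat :=
  ⟨PySem.List.slice_from xs (pvM_bounds kc).1, PySem.List.slice_to xs (pvM_bounds kc).1⟩

theorem pvVals_length (kc : Char) :
    (PySem.List.slice pvU (some (PySem.Int.mod (65 - (kc.toNat : Int)) 26)) none ++
     PySem.List.slice pvU none (some (PySem.Int.mod (65 - (kc.toNat : Int)) 26)) ++
     PySem.List.slice pvL (some (PySem.Int.mod (65 - (kc.toNat : Int)) 26)) none ++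
     PySem.List.slice pvL none (some (PySem.Int.mod (65 - (kc.toNat : Int)) 26))).length = (pvU ++ pvL).length := by
  rw [(pvSlices pvU kc).1, (pvSlices pvU kc).2, (pvSlices pvL kc).1, (pvSlices pvL kc).2]
  have hmt : (PySem.Int.mod (65 - (kc.toNat : Int)) 26).toNat < 26 := by
    have := pvM_bounds kc; omega
  simp only [List.length_append, List.length_drop, List.length_take]
  have hU : pvU.length = 26 := by decide
  have hL : pvL.length = 26 := by decide
  omega

theorem pvTableB_items (kc : Char) :
    (pvTableB kc).items = (pvU ++ pvL).zip
      (PySem.List.slice pvU (some (PySem.Int.mod (65 - (kc.toNat : Int)) 26)) none ++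
       PySem.List.slice pvU none (some (PySem.Int.mod (65 - (kc.toNat : Int)) 26)) ++
       PySem.List.slice pvL (some (PySem.Int.mod (65 - (kc.toNat : Int)) 26)) none ++
       PySem.List.slice pvL none (some (PySem.Int.mod (65 - (kc.toNat : Int)) 26))) := by
  rw [pvTableB]
  rw [PySem.Dict.ofList, PySem.Dict.update]
  rw [show (fun (acc : PySem.Dict Char Char) (p : Char × Char) => acc.insert p.1 p.2)
      = (fun (acc : PySem.Dict Char Char) (p : Char × Char) => acc.insert ((fun q : Char × Char => q.1) p) ((fun q : Char × Char => q.2) p)) from rfl]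
  rw [PySem.Dict.items_foldl_insert_fresh _ _ _ _ (by intro a _; rfl)
    (pvZipNodupFst (by rw [pvVals_length kc]))]
  simp [PySem.Dict.empty]

-- the value B's table stores for the letter with index j in the alphabet starting at base
theorem pvZipMem {a b : Char} (as bs : List Char) (i : Nat)
    (ha : as[i]? = some a) (hb : bs[i]? = some b) : (a, b) ∈ as.zip bs := by
  rcases List.getElem?_eq_some_iff.mp ha with ⟨hia, hva⟩
  rcases List.getElem?_eq_some_iff.mp hb with ⟨hib, hvb⟩
  have hi : i < (as.zip bs).length := by
    rw [List.length_zip]; omega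
  have : (as.zip bs)[i]'hi = (a, b) := by
    rw [List.getElem_zip, hva, hvb]
  rw [← this]
  exact List.getElem_mem hi

-- the value B's table stores for the letter with index j in the alphabet starting at base
theorem pvTableB_getD_half (kc : Char) (base j : Nat)
    (hbase : base = 65 ∨ base = 97) (hj : j < 26) :
    (pvTableB kc).getD (Char.ofNat (base + j)) 'A' =
      Char.ofNat (base + (j + (PySem.Int.mod (65 - (kc.toNat : Int)) 26).toNat) % 26) := by
  have hmt : (PySem.Int.mod (65 - (kc.toNat : Int)) 26).toNat < 26 := by
    have := pvM_bounds kc; omega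
  set mt := (PySem.Int.mod (65 - (kc.toNat : Int)) 26).toNat with hmtdef
  have hlenU : pvU.length = 26 := by decide
  have hlenL : pvL.length = 26 := by decide
  have hitems : (pvTableB kc).items =
      (pvU ++ pvL).zip ((pvU.drop mt ++ pvU.take mt) ++ (pvL.drop mt ++ pvL.take mt)) := by
    rw [pvTableB_items kc, (pvSlices pvU kc).1, (pvSlices pvU kc).2,
        (pvSlices pvL kc).1, (pvSlices pvL kc).2, ← hmtdef]
    simp [List.append_assoc]
  have hnodup : (pvTableB kc).keys.Nodup := by
    show ((pvTableB kc).items.map (fun p => p.1)).Nodup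
    rw [hitems]
    apply pvZipNodupFst
    simp only [List.length_append, List.length_drop, List.length_take, hlenU, hlenL]
    omega
  have hzsplit : (pvU ++ pvL).zip ((pvU.drop mt ++ pvU.take mt) ++ (pvL.drop mt ++ pvL.take mt))
      = pvU.zip (pvU.drop mt ++ pvU.take mt) ++ pvL.zip (pvL.drop mt ++ pvL.take mt) := by
    rw [List.zip_append]
    simp only [List.length_append, List.length_drop, List.length_take, hlenU]
    omega
  have hUget : pvU[j]? = some (Char.ofNat (65 + j)) := by
    rw [pvU_eq]; simp [hj]
  have hLget : pvL[j]? = some (Char.ofNat (97 + j)) := by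
    rw [pvL_eq]; simp [hj]
  have hrotU := pvRot_getElem (fun i => Char.ofNat (65 + i)) mt j hmt hj
  have hrotL := pvRot_getElem (fun i => Char.ofNat (97 + i)) mt j hmt hj
  rw [← pvU_eq] at hrotU
  rw [← pvL_eq] at hrotL
  rcases hbase with hb | hb
  · subst hb
    have hmem : (Char.ofNat (65 + j), Char.ofNat (65 + (j + mt) % 26)) ∈ (pvTableB kc).items := by
      rw [hitems, hzsplit]
      exact List.mem_append_left _ (pvZipMem _ _ j hUget hrotU)
    exact PySem.Dict.getD_of_mem_items _ hmem hnodup 'A'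
  · subst hb
    have hmem : (Char.ofNat (97 + j), Char.ofNat (97 + (j + mt) % 26)) ∈ (pvTableB kc).items := by
      rw [hitems, hzsplit]
      exact List.mem_append_right _ (pvZipMem _ _ j hLget hrotL)
    exact PySem.Dict.getD_of_mem_items _ hmem hnodup 'A'

-- lookup in B's table equals A's arithmetic decryption, for a letter c
theorem pvTableB_getD (kc : Char) (c : Char) (hc : PySem.Chars.isalpha c = true) :
    (pvTableB kc).getD c 'A' =
      Char.ofNat (PySem.Int.mod ((c.toNat : Int) - (if PySem.Chars.isupper c then 65 else 97) - ((kc.toNat : Int) - 65)) 26 + (if PySem.Chars.isupper c then 65 else 97)).toNat := by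
  have hm := pvM_bounds kc
  have hmod26 : ((PySem.Int.mod (65 - (kc.toNat : Int)) 26).toNat : Int) = (65 - (kc.toNat : Int)) % 26 := by
    rw [Int.toNat_of_nonneg hm.1]
    exact PySem.Int.mod_eq_emod_of_pos (by norm_num)
  rw [PySem.Chars.isalpha] at hc
  rcases Bool.or_eq_true_iff.mp hc with hu | hl
  · have hb : 65 ≤ c.toNat ∧ c.toNat ≤ 90 := by
      rw [PySem.Chars.isupper] at hu
      have h1 := (Bool.and_eq_true_iff.mp hu).1
      have h2 := (Bool.and_eq_true_iff.mp hu).2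
      constructor
      · exact Char.le_def.mp (of_decide_eq_true h1)
      · exact Char.le_def.mp (of_decide_eq_true h2)
    have hcj : c = Char.ofNat (65 + (c.toNat - 65)) := by
      rw [show 65 + (c.toNat - 65) = c.toNat by omega, Char.ofNat_toNat]
    rw [hu, if_pos rfl]
    conv_lhs => rw [hcj]
    rw [pvTableB_getD_half kc 65 (c.toNat - 65) (Or.inl rfl) (by omega)]
    congr 1
    have := hmod26
    simp only [PySem.Int.mod_eq_emod_of_pos (show (0:Int) < 26 by norm_num)] at *
    omega
  · have hb : 97 ≤ c.toNat ∧ c.toNat ≤ 122 := by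
      rw [PySem.Chars.islower] at hl
      have h1 := (Bool.and_eq_true_iff.mp hl).1
      have h2 := (Bool.and_eq_true_iff.mp hl).2
      constructor
      · exact Char.le_def.mp (of_decide_eq_true h1)
      · exact Char.le_def.mp (of_decide_eq_true h2)
    have hnu : PySem.Chars.isupper c = false := by
      rw [PySem.Chars.isupper]
      simp only [Bool.and_eq_false_iff, decide_eq_false_iff_not]
      right
      intro hcon
      have h90 : c.toNat ≤ 90 := UInt32.le_iff_toNat_le.mp (Char.le_def.mp hcon)
      omega
    have hcj : c = Char.ofNat (97 + (c.toNat - 97)) := by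
      rw [show 97 + (c.toNat - 97) = c.toNat by omega, Char.ofNat_toNat]
    rw [hnu, if_neg (by simp)]
    conv_lhs => rw [hcj]
    rw [pvTableB_getD_half kc 97 (c.toNat - 97) (Or.inr rfl) (by omega)]
    congr 1
    have := hmod26
    simp only [PySem.Int.mod_eq_emod_of_pos (show (0:Int) < 26 by norm_num)] at *
    omega

-- B's table list is the map of pvTableB
theorem pvTables_eq (ku : List Char) :
    ku.foldl (fun acc kc => acc ++ [pvTableB kc]) [] = ku.map pvTableB := by
  simpa using PySem.List.foldl_append_singleton_eq_map (f := pvTableB) (l := ku) (acc := [])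

-- B's lookup step equals pvDec, for a letter and nonempty key
theorem pvLookup_eq_pvDec (ku : List Char) (hku : ku ≠ []) (c : Char)
    (hc : PySem.Chars.isalpha c = true) (n : Int) :
    (PySem.List.pyGetD (ku.map pvTableB) (PySem.Int.mod n (((ku.map pvTableB).length : Int))) (PySem.Dict.mk [])).getD c 'A'
      = pvDec ku c n := by
  have hlen : (ku.map pvTableB).length = ku.length := List.length_map ..
  have hpos : (0:Int) < (ku.length : Int) := by
    cases ku with
    | nil => exact absurd rfl hku
    | cons a t => simp
  have hidx0 : 0 ≤ PySem.Int.mod n (ku.length : Int) := PySem.Int.mod_nonneg _ hpos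
  have hidx1 : PySem.Int.mod n (ku.length : Int) < (ku.length : Int) := PySem.Int.mod_lt _ hpos
  rw [hlen]
  rw [PySem.List.pyGetD_eq_getElem _ _ hidx0 (by rw [hlen]; exact_mod_cast hidx1)]
  rw [pvDec]
  rw [PySem.List.pyGetD_eq_getElem _ _ hidx0 (by exact_mod_cast hidx1)]
  rw [List.getElem_map]
  exact pvTableB_getD _ c hc

-- the merge of the decrypted letter stream with the text is A's interleaved map
theorem pvMerge_eq (ku : List Char) (g : Int × Char → Char)
    (hg : ∀ n c, PySem.Chars.isalpha c = true → g (n, c) = pvDec ku c n) :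
    ∀ (cs : List Char) (n : Int),
      pvMergeB cs ((PySem.List.enumerate (cs.filter (fun c => PySem.Chars.isalpha c)) n).map g) = pvMapA ku cs n := by
  intro cs
  induction cs with
  | nil => intro n; simp [pvMergeB, pvMapA]
  | cons c t ih =>
    intro n
    by_cases h : PySem.Chars.isalpha c = true
    · simp only [List.filter_cons, h, if_pos, PySem.List.enumerate_cons, List.map_cons, pvMergeB, pvMapA]
      simp only [List.headD_cons, List.tail_cons]
      rw [hg n c h, ih (n + 1)]
    · simp only [List.filter_cons, h, Bool.false_eq_true, if_false, pvMergeB, pvMapA]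
      rw [ih n]

-- ===== VERDICT (by name: the statement is the Claim_ definition above) =====
theorem vigenere_decrypt_preserve_spec : Claim_equal_vigenere_decrypt_preserve := by
  intro text key _ hPre
  show vigenere_decrypt_preserve text key = vigenere_decrypt_preserve_alt text key
  rw [vigenere_decrypt_preserve, vigenere_decrypt_preserve_alt]
  rw [pvTables_eq]
  rw [pvA_foldl]
  simp only [List.nil_append, Nat.cast_zero]
  set ku := (PySem.Str.upper key).toList with hku
  by_cases hk : key.toList = []
  · -- empty key: Pre_ guarantees no letters in text
    rcases hPre with hPre | hPre
    · exact absurd hk hPre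
    · congr 1
      have hfilter : text.toList.filter (fun c => PySem.Chars.isalpha c) = [] := by
        rw [List.filter_eq_nil_iff]
        intro c hcmem
        have := List.all_eq_true.mp hPre c hcmem
        simpa using this
      rw [hfilter]
      simp only [PySem.List.enumerate_nil, List.map_nil]
      exact (pvMerge_nil ku text.toList hPre 0).symm
  · have hkune : ku ≠ [] := by
      rw [hku]
      simp only [PySem.Str.toList_upper, PySem.Chars.upper]
      intro hcon
      exact hk (by simpa using hcon)
    congr 1
    exact (pvMerge_eq ku _
      (fun n c hc => pvLookup_eq_pvDec ku hkune c hc n) text.toList 0).symm
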